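-- pv_equiv track=rewrite | github.com/gabbarco/CaixeiroViajante | AlgoritmoGenetico/main.py | cal_fitness
-- ===== SOURCE A (Python) =====
-- INT_MAX = 2147483647
--
-- def cal_fitness(gnome):
-- 	mp = [
-- 		[0, 60, INT_MAX, 120, 50, 60],
-- 		[60, 0, 50, INT_MAX, 100, 25],
-- 		[INT_MAX, 50, 0, 70, 100, 25],
-- 		[120, INT_MAX, 70, 0, 80, 75],
-- 		[50, 100, 100, 80, 0, 75],
--     [60, 25, 25, 75, 75, 0],
-- 	]
-- 	f = 0
-- 	for i in range(len(gnome) - 1):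
-- 		if mp[ord(gnome[i]) - 48][ord(gnome[i + 1]) - 48] == INT_MAX:
-- 			return INT_MAX
-- 		f += mp[ord(gnome[i]) - 48][ord(gnome[i + 1]) - 48]
--
-- 	return f
-- ===== SOURCE B (Python) =====
-- INT_MAX = 2147483647
--
-- def cal_fitness(gnome):
-- 	mp = [
-- 		[0, 60, INT_MAX, 120, 50, 60],
-- 		[60, 0, 50, INT_MAX, 100, 25],
-- 		[INT_MAX, 50, 0, 70, 100, 25],
-- 		[120, INT_MAX, 70, 0, 80, 75],
-- 		[50, 100, 100, 80, 0, 75],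
-- 		[60, 25, 25, 75, 75, 0],
-- 	]
-- 	# aggregate the multiset of consecutive pairs once
-- 	counts = {}
-- 	for pair in zip(gnome, gnome[1:]):
-- 		counts[pair] = counts.get(pair, 0) + 1
-- 	# one weight lookup per DISTINCT pair, weighted by multiplicity
-- 	total = 0
-- 	for (a, b), k in counts.items():
-- 		w = mp[ord(a) - 48][ord(b) - 48]
-- 		if w == INT_MAX:
-- 			return INT_MAX
-- 		total += w * k
-- 	return total
-- ===== Notes on version B (the rewrite author's own statement) =====
-- stated objective: alternative
-- what changed: Instead of A's edge-by-edge accumulation along the path, B builds a multiplicity dictionary of the distinct consecutive character pairs in one pass and then sums weight*multiplicity with a single matrix lookup per distinct pair (correct because addition is order-independent and an infinite edge occurs iff some distinct pair is infinite).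
import Mathlib
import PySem

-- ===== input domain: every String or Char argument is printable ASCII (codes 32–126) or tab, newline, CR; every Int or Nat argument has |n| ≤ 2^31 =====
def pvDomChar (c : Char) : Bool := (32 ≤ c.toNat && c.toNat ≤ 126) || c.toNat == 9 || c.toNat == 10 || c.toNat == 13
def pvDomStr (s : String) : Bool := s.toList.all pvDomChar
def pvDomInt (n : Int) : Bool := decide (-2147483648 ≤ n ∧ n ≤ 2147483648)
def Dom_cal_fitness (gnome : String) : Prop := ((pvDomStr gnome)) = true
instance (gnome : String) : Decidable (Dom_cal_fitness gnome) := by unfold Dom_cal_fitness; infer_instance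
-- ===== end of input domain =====

-- B replaces A's edge-by-edge accumulation along the path by a multiplicity dictionary of the
-- distinct consecutive pairs, then one weight lookup per distinct pair times its multiplicity
-- (objective: alternative; correct because addition is commutative).

def pvIntMax : Int := 2147483647

def pvMp : List (List Int) :=
  [ [0, 60, pvIntMax, 120, 50, 60],
    [60, 0, 50, pvIntMax, 100, 25],
    [pvIntMax, 50, 0, 70, 100, 25],
    [120, pvIntMax, 70, 0, 80, 75],
    [50, 100, 100, 80, 0, 75],
    [60, 25, 25, 75, 75, 0] ]

-- mp[ord(a)-48][ord(b)-48]; defaults are unreachable under Pre_cal_fitness (Python raises there)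
def pvEdge (a b : Char) : Int :=
  (PySem.List.pyGet? ((PySem.List.pyGet? pvMp ((a.toNat : Int) - 48)).getD []) ((b.toNat : Int) - 48)).getD 0

-- ===== PORT A =====
-- the 'for i in range(len(gnome)-1)' loop walking consecutive pairs, with early return
def pvLoopA : List Char → Int → Int
  | a :: b :: rest, f =>
      if pvEdge a b == pvIntMax then pvIntMax
      else pvLoopA (b :: rest) (f + pvEdge a b)
  | _, f => f

def cal_fitness (gnome : String) : Int := pvLoopA gnome.toList 0

-- ===== PORT B =====
-- 'for (a, b), k in counts.items()' with early return on an infinite weight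
def pvLoopB : List ((Char × Char) × Int) → Int → Int
  | ((a, b), k) :: rest, t =>
      if pvEdge a b == pvIntMax then pvIntMax
      else pvLoopB rest (t + pvEdge a b * k)
  | [], t => t

def cal_fitness_alt (gnome : String) : Int :=
  let cs := gnome.toList
  -- 'counts[pair] = counts.get(pair, 0) + 1' over zip(gnome, gnome[1:])
  let counts : PySem.Dict (Char × Char) Int :=
    (cs.zip cs.tail).foldl (fun d p => d.insert p (d.getD p 0 + 1)) PySem.Dict.empty
  pvLoopB counts.items 0

-- ===== PRECONDITION & SPEC =====
-- good c: ord(c)-48 is a valid (possibly wraparound-negative) index into the 6x6 matrix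
def pvGood (c : Char) : Prop := 42 ≤ c.toNat ∧ c.toNat ≤ 53

-- Excludes exactly the inputs on which Python A raises IndexError: some consecutive pair has a
-- character outside codes 42–53 and no earlier all-good INT_MAX pair short-circuits the loop first.
def Pre_cal_fitness (gnome : String) : Prop :=
  ∀ i < gnome.toList.length - 1,
    ¬ (pvGood (gnome.toList.getD i ' ') ∧ pvGood (gnome.toList.getD (i + 1) ' ')) →
      ∃ j < i, pvGood (gnome.toList.getD j ' ') ∧ pvGood (gnome.toList.getD (j + 1) ' ') ∧
        pvEdge (gnome.toList.getD j ' ') (gnome.toList.getD (j + 1) ' ') = pvIntMax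
instance (gnome : String) : Decidable (Pre_cal_fitness gnome) := by
  unfold Pre_cal_fitness pvGood; infer_instance

def pvWitness_cal_fitness : String := "0123450"

def Spec_cal_fitness (gnome : String) (out : Int) : Prop := out = cal_fitness_alt gnome
instance (gnome : String) (out : Int) : Decidable (Spec_cal_fitness gnome out) := by
  unfold Spec_cal_fitness; infer_instance

-- ===== CLAIM (what is proved, stated in full; the proofs are below) =====
def Claim_equal_cal_fitness : Prop :=
  ∀ (gnome : String), Dom_cal_fitness gnome → Pre_cal_fitness gnome →
    Spec_cal_fitness gnome (cal_fitness gnome)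

-- ===== LEMMAS AND PROOFS =====

-- A's loop computes: INT_MAX if some consecutive edge is INT_MAX, else the plain edge sum.
theorem pvLoopA_eq (cs : List Char) :
    ∀ f : Int,
      pvLoopA cs f =
        (if pvIntMax ∈ (cs.zip cs.tail).map (fun p => pvEdge p.1 p.2) then pvIntMax
         else f + ((cs.zip cs.tail).map (fun p => pvEdge p.1 p.2)).sum) := by
  induction cs with
  | nil => intro f; simp [pvLoopA]
  | cons a rest ih =>
    intro f
    cases rest with
    | nil => simp [pvLoopA]
    | cons b rest' =>
      by_cases h : pvEdge a b = pvIntMax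
      · simp [pvLoopA, h]
      · have hne : (pvEdge a b == pvIntMax) = false := by simpa using h
        simp only [pvLoopA, hne, Bool.false_eq_true, if_false]
        rw [ih (f + pvEdge a b)]
        have h' : ¬ pvIntMax = pvEdge a b := fun e => h e.symm
        simp [List.zip_cons_cons, add_assoc, h']

-- B's loop computes: INT_MAX if some item's pair is an INT_MAX edge, else t + Σ weight·mult.
theorem pvLoopB_eq (l : List ((Char × Char) × Int)) :
    ∀ t : Int,
      pvLoopB l t =
        (if ∃ q ∈ l, pvEdge q.1.1 q.1.2 = pvIntMax then pvIntMax
         else t + (l.map (fun q => pvEdge q.1.1 q.1.2 * q.2)).sum) := by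
  induction l with
  | nil => intro t; simp [pvLoopB]
  | cons q rest ih =>
    intro t
    obtain ⟨⟨a, b⟩, k⟩ := q
    by_cases h : pvEdge a b = pvIntMax
    · simp [pvLoopB, h]
    · have hne : (pvEdge a b == pvIntMax) = false := by simpa using h
      simp only [pvLoopB, hne, Bool.false_eq_true, if_false]
      rw [ih (t + pvEdge a b * k)]
      have hx : (∃ q ∈ ((a, b), k) :: rest, pvEdge q.1.1 q.1.2 = pvIntMax)
          ↔ ∃ q ∈ rest, pvEdge q.1.1 q.1.2 = pvIntMax := by
        constructor
        · rintro ⟨q, hq, he⟩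
          rcases List.mem_cons.mp hq with rfl | hq'
          · exact absurd he h
          · exact ⟨q, hq', he⟩
        · rintro ⟨q, hq, he⟩
          exact ⟨q, List.mem_cons_of_mem _ hq, he⟩
      rw [if_congr hx rfl rfl]
      simp [add_assoc]

set_option maxHeartbeats 1000000 in
-- sum over distinct pairs of weight·multiplicity = plain sum over all pairs
theorem pv_count_sum (ps : List (Char × Char)) :
    (((PySem.Set.ofList ps).map
        (fun k => pvEdge k.1 k.2 * ((ps.count k : Int)))).sum)
      = (ps.map (fun p => pvEdge p.1 p.2)).sum := by
  classical
  have hnd : (PySem.Set.ofList ps).Nodup := PySem.Set.nodup_ofList ps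
  have hfin : (PySem.Set.ofList ps).toFinset = ps.toFinset := by
    ext x; simp [List.mem_toFinset, PySem.Set.mem_ofList]
  rw [← List.sum_toFinset _ hnd, hfin, Finset.sum_list_map_count ps (fun p => pvEdge p.1 p.2)]
  apply Finset.sum_congr rfl
  intro m _
  have hinst : (instBEqProd : BEq (Char × Char)) = instBEqOfDecidableEq :=
    lawful_beq_subsingleton _ _
  rw [hinst, nsmul_eq_mul, mul_comm]

theorem cal_fitness_spec : Claim_equal_cal_fitness := by
  intro gnome _ _
  unfold Spec_cal_fitness cal_fitness cal_fitness_alt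
  simp only [PySem.Dict.foldl_insert_getD_add_one_eq_counter, PySem.Dict.items_counter]
  rw [pvLoopA_eq, pvLoopB_eq]
  set ps := gnome.toList.zip gnome.toList.tail with hps
  have hmem : (∃ q ∈ (PySem.Set.ofList ps).map (fun k => (k, (ps.count k : Int))),
        pvEdge q.1.1 q.1.2 = pvIntMax)
      ↔ pvIntMax ∈ ps.map (fun p => pvEdge p.1 p.2) := by
    simp only [List.mem_map, PySem.Set.mem_ofList]
    constructor
    · rintro ⟨q, ⟨k, hk, rfl⟩, hq⟩
      exact ⟨k, hk, hq⟩
    · rintro ⟨p, hp, he⟩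
      exact ⟨(p, (ps.count p : Int)), ⟨p, hp, rfl⟩, he⟩
  by_cases h : pvIntMax ∈ ps.map (fun p => pvEdge p.1 p.2)
  · rw [if_pos h, if_pos (hmem.mpr h)]
  · rw [if_neg h, if_neg (fun hx => h (hmem.mp hx))]
    rw [List.map_map]
    simp only [Function.comp_def]
    rw [pv_count_sum ps]
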